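-- pv_equiv track=rewrite | github.com/youwol/py-youwol | youwol_utils/utils.py | get_all_individual_groups
-- ===== SOURCE A (Python) =====
-- import itertools
-- from typing import Union, List, cast, Mapping, Callable, Iterable, Any, NamedTuple
--
-- flatten = itertools.chain.from_iterable
--
-- def get_all_individual_groups(groups: List[str]) -> List[Union[str, None]]:
--     def get_combinations(elements: List[str]):
--         result = []
--         for i in range(1, len(elements)):
--             result.append('/'.join(elements[0:i]))
--         return result
--
--     parts = [group.split('/') for group in groups if group]
--     parts_flat = flatten([get_combinations(part) for part in parts])
--     parts_flat = [e for e in parts_flat if e] + cast(any, [None])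
--     return list(set(groups + parts_flat))
-- ===== SOURCE B (Python) =====
-- def get_all_individual_groups(groups):
--     # One pass per string: every '/' at position i > 0 marks the proper prefix
--     # group[:i]; no split/join/flatten needed (i == 0 would give the empty prefix).
--     items = list(groups)
--     for g in groups:
--         for i, c in enumerate(g):
--             if i and c == '/':
--                 items.append(g[:i])
--     items.append(None)
--     return list(set(items))
-- ===== Notes on version B (the rewrite author's own statement) =====
-- stated objective: simpler
-- what changed: Instead of splitting each group on '/', building all '/'-joined part prefixes with nested comprehensions/itertools.flatten and filtering out empties, B makes one direct scan per string collecting g[:i] at every slash position i>0, then dedupes once with set.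
import Mathlib
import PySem

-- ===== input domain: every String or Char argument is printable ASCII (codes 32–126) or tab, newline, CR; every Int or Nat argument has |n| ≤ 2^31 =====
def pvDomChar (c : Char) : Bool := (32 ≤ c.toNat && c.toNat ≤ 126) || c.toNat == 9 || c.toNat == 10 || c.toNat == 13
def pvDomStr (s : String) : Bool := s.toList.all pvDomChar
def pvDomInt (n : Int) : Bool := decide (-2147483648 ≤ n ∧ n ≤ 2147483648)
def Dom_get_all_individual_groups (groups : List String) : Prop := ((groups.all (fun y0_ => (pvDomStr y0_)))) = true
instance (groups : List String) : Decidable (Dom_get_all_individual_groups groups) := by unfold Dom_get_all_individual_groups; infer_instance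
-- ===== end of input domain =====

-- B replaces A's split/join/flatten prefix construction by one direct scan per string,
-- collecting g[:i] at every slash position i > 0 (objective: simpler; same set of values).

-- ===== PORT A =====
-- '/'.join(elements[0:i]) for i in range(1, len(elements))
def pvGetCombinations (elements : List String) : List String :=
  (PySem.List.pyRange 1 (elements.length : Int) 1).foldl
    (fun result i => result ++ [PySem.Str.join "/" (PySem.List.slice elements (some 0) (some i))]) []

def get_all_individual_groups (groups : List String) : List (Option String) :=
  -- group.split('/') with the nonempty separator "/": exactly PySem.Chars.splitOn
  -- (the some-branch of PySem.Str.split?, which models str.split for sep ≠ '')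
  let parts := (groups.filter (fun g => g ≠ "")).map
    (fun g => (PySem.Chars.splitOn g.toList "/".toList).map String.ofList)
  let parts_flat := (parts.map pvGetCombinations).flatten
  let parts_flat2 := (parts_flat.filter (fun e => e ≠ "")).map some ++ [(none : Option String)]
  PySem.Set.ofList (groups.map some ++ parts_flat2)

-- ===== PORT B =====
def get_all_individual_groups_alt (groups : List String) : List (Option String) :=
  let items := groups.map some
  let items := groups.foldl (fun acc g =>
      (PySem.List.enumerate g.toList 0).foldl (fun acc2 ic =>
        if 0 < ic.1 ∧ ic.2 = '/' then acc2 ++ [some (PySem.Str.slice g none (some ic.1))]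
        else acc2) acc)
    items
  PySem.Set.ofList (items ++ [(none : Option String)])

-- ===== PRECONDITION & SPEC =====
def Spec_get_all_individual_groups (groups : List String) (out : List (Option String)) : Prop := out = get_all_individual_groups_alt groups
instance (groups : List String) (out : List (Option String)) : Decidable (Spec_get_all_individual_groups groups out) := by unfold Spec_get_all_individual_groups; infer_instance

-- ===== CLAIM (what is proved, stated in full; the proofs are below) =====
def Claim_equal_get_all_individual_groups : Prop := ∀ (groups : List String), Dom_get_all_individual_groups groups → Spec_get_all_individual_groups groups (get_all_individual_groups groups)

-- ===== LEMMAS AND PROOFS =====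

def pvSplitP (c : Char) : List Char → List Char × List (List Char)
  | [] => ([], [])
  | a :: rest =>
      if a = c then ([], (pvSplitP c rest).1 :: (pvSplitP c rest).2)
      else (a :: (pvSplitP c rest).1, (pvSplitP c rest).2)

theorem pvSplitOn_go (c : Char) : ∀ (l : List Char) (fuel : Nat) (cur : List Char) (acc : List (List Char)),
    l.length < fuel →
    PySem.Chars.splitOn.go [c] fuel l cur acc
      = acc.reverse ++ (cur.reverse ++ (pvSplitP c l).1) :: (pvSplitP c l).2 := by
  intro l
  induction l with
  | nil =>
    intro fuel cur acc h
    obtain ⟨f, rfl⟩ : ∃ f, fuel = f + 1 := ⟨fuel - 1, by omega⟩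
    simp [PySem.Chars.splitOn.go, pvSplitP]
  | cons a rest ih =>
    intro fuel cur acc h
    obtain ⟨f, rfl⟩ : ∃ f, fuel = f + 1 := ⟨fuel - 1, by omega⟩
    rw [PySem.Chars.splitOn.go]
    by_cases hc : a = c
    · subst hc
      simp only [List.isPrefixOf, beq_self_eq_true, Bool.and_self, if_pos, List.length_cons,
        List.length_nil, List.drop_succ_cons, List.drop_zero, Nat.zero_add]
      rw [ih _ [] _ (by simpa using h)]
      simp [pvSplitP]
    · have : [c].isPrefixOf (a :: rest) = false := by
        simp [List.isPrefixOf]; exact fun h' => (hc h'.symm).elim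
      rw [this]
      simp only [Bool.false_eq_true, if_false]
      rw [ih _ _ _ (by simpa using h)]
      simp [pvSplitP, hc]

theorem pvSplitOn_eq (c : Char) (cs : List Char) :
    PySem.Chars.splitOn cs [c] = (pvSplitP c cs).1 :: (pvSplitP c cs).2 := by
  rw [PySem.Chars.splitOn, pvSplitOn_go c cs (cs.length + 1) [] [] (by omega)]
  simp

def pvBscan (pre : List Char) : List Char → List (List Char)
  | [] => []
  | a :: rest => (if a = '/' ∧ pre ≠ [] then [pre] else []) ++ pvBscan (pre ++ [a]) rest

def pvG (pre : List Char) : List (List Char) → List (List Char)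
  | [] => []
  | [_] => []
  | p :: q :: rest => (if pre ++ p = [] then [] else [pre ++ p]) ++ pvG (pre ++ p ++ ['/']) (q :: rest)

theorem pvG_cons_cons (pre p q : List Char) (rest : List (List Char)) :
    pvG pre (p :: q :: rest)
      = (if pre ++ p = [] then [] else [pre ++ p]) ++ pvG (pre ++ p ++ ['/']) (q :: rest) := rfl

theorem pvG_single (pre p : List Char) : pvG pre [p] = [] := rfl

theorem pvGA : ∀ (ps : List (List Char)) (p pre : List Char),
    ((List.range ((p :: ps).length - 1)).map
        (fun k => pre ++ PySem.Chars.join ['/'] ((p :: ps).take (k+1)))).filter (fun l => decide (l ≠ []))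
      = pvG pre (p :: ps) := by
  intro ps
  induction ps with
  | nil => intro p pre; simp [pvG]
  | cons q rest ih =>
    intro p pre
    simp only [List.length_cons, Nat.add_sub_cancel, List.range_succ_eq_map]
    simp only [List.map_cons, List.map_map]
    rw [List.filter_cons]
    have h0 : pre ++ PySem.Chars.join ['/'] ((p :: q :: rest).take 1) = pre ++ p := by
      simp [PySem.Chars.join_singleton]
    have h1 : (List.map ((fun k => pre ++ PySem.Chars.join ['/'] ((p :: q :: rest).take (k+1))) ∘ Nat.succ) (List.range rest.length))
        = List.map (fun k => (pre ++ p ++ ['/']) ++ PySem.Chars.join ['/'] ((q :: rest).take (k+1))) (List.range rest.length) := by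
      apply List.map_congr_left
      intro k hk
      simp only [Function.comp_apply, Nat.succ_eq_add_one]
      rw [List.take_succ_cons, List.take_succ_cons, PySem.Chars.join_cons_cons]
      simp
    have ih' := ih q (pre ++ p ++ ['/'])
    simp only [List.length_cons, Nat.add_sub_cancel] at ih'
    rw [h0, h1, ih']
    show _ = pvG pre (p :: q :: rest)
    rw [pvG_cons_cons]
    by_cases hp : pre ++ p = []
    · simp [hp]
    · simp [hp]

theorem pvGB : ∀ (cs pre : List Char),
    pvG pre ((pvSplitP '/' cs).1 :: (pvSplitP '/' cs).2) = pvBscan pre cs := by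
  intro cs
  induction cs with
  | nil => intro pre; simp [pvSplitP, pvG, pvBscan]
  | cons a rest ih =>
    intro pre
    by_cases hc : a = '/'
    · subst hc
      simp only [pvSplitP, reduceIte]
      rw [pvG_cons_cons, pvBscan]
      rw [← ih (pre ++ ['/'])]
      by_cases hp : pre = [] <;> simp [hp]
    · simp only [pvSplitP, if_neg hc]
      rw [pvBscan]
      simp only [if_neg (fun h : a = '/' ∧ pre ≠ [] => hc h.1)]
      rw [← ih (pre ++ [a])]
      rcases h2 : (pvSplitP '/' rest).2 with _ | ⟨q, t⟩
      · rw [pvG_single, pvG_single]; simp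
      · rw [pvG_cons_cons, pvG_cons_cons]
        simp

theorem pvLB : ∀ (cs pre : List Char) (g : String), g.toList = pre ++ cs →
    ((PySem.List.enumerate cs (pre.length : Int)).filter
        (fun ic => decide (0 < ic.1 ∧ ic.2 = '/'))).map
      (fun ic => some (PySem.Str.slice g none (some ic.1)))
    = (pvBscan pre cs).map (fun l => some (String.ofList l)) := by
  intro cs
  induction cs with
  | nil => intro pre g hg; simp [PySem.List.enumerate, pvBscan]
  | cons a rest ih =>
    intro pre g hg
    rw [PySem.List.enumerate_cons, pvBscan]
    have hlen : ((pre.length : Int) + 1) = (((pre ++ [a]).length : Int)) := by simp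
    rw [List.filter_cons]
    by_cases hcond : (0 : Int) < (pre.length : Int) ∧ a = '/'
    · have hpre : pre ≠ [] := by
        intro h; subst h; simp at hcond
      have hsl : PySem.Str.slice g none (some (pre.length : Int)) = String.ofList pre := by
        have h1 : (PySem.Str.slice g none (some (pre.length : Int))).toList = pre := by
          rw [PySem.Str.toList_slice]
          show PySem.List.slice g.toList none (some (pre.length : Int)) = pre
          rw [PySem.List.slice_to _ (Int.natCast_nonneg _)]
          rw [hg]
          simp
        have h2 := congrArg String.ofList h1
        rw [String.ofList_toList] at h2
        exact h2
      have hd := decide_eq_true hcond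
      simp only [hd]
      rw [if_pos trivial, List.map_cons, hlen, ih (pre ++ [a]) g (by simpa using hg),
        if_pos ⟨hcond.2, hpre⟩, hsl]
      simp
    · have hd := decide_eq_false hcond
      simp only [hd, Bool.false_eq_true, if_false]
      rw [hlen, ih (pre ++ [a]) g (by simpa using hg)]
      have hnc : ¬ (a = '/' ∧ pre ≠ []) := by
        intro h
        exact hcond ⟨by simpa using List.length_pos_of_ne_nil h.2, h.1⟩
      simp [if_neg hnc]

theorem pvCombos_eq (elements : List String) :
    pvGetCombinations elements
      = (List.range (elements.length - 1)).map
          (fun k => PySem.Str.join "/" (elements.take (k+1))) := by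
  unfold pvGetCombinations
  rw [PySem.List.pyRange_one, List.foldl_map, PySem.List.foldl_append_singleton_eq_map]
  have hn : ((elements.length : Int) - 1).toNat = elements.length - 1 := by omega
  rw [hn, List.nil_append]
  apply List.map_congr_left
  intro k hk
  rw [List.mem_range] at hk
  rw [PySem.List.slice_zero_start, PySem.List.slice_to _ (by omega)]
  have h1 : ((1 : Int) + (k : Int)).toNat = k + 1 := by omega
  rw [h1]

theorem pvJoin_map (t : List (List Char)) :
    PySem.Str.join "/" (t.map String.ofList) = String.ofList (PySem.Chars.join ['/'] t) := by
  rw [PySem.Str.join.eq_1]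
  congr 1
  rw [List.map_map]
  congr 1
  have : (String.toList ∘ String.ofList) = (id : List Char → List Char) := by
    funext l; simp
  rw [this, List.map_id]

theorem pvFilter_ofList (L : List (List Char)) :
    (L.map String.ofList).filter (fun e => decide (e ≠ ""))
      = (L.filter (fun l => decide (l ≠ []))).map String.ofList := by
  rw [List.filter_map]
  congr 1
  apply List.filter_congr
  intro l _
  simp only [Function.comp_apply]
  by_cases h : l = []
  · subst h; simp
  · have : String.ofList l ≠ "" := by
      intro he
      exact h (by simpa [String.toList_ofList] using congrArg String.toList he)
    simp [h, this]

theorem pvPerGroup (g : String) :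
    ((pvGetCombinations ((PySem.Chars.splitOn g.toList "/".toList).map String.ofList)).filter
        (fun e => decide (e ≠ ""))).map some
      = ((PySem.List.enumerate g.toList 0).filter
          (fun ic => decide (0 < ic.1 ∧ ic.2 = '/'))).map
        (fun ic => some (PySem.Str.slice g none (some ic.1))) := by
  have hsep : "/".toList = ['/'] := rfl
  rw [hsep, pvSplitOn_eq '/', pvCombos_eq]
  have hlen : (((pvSplitP '/' g.toList).1 :: (pvSplitP '/' g.toList).2).map String.ofList).length - 1
      = ((pvSplitP '/' g.toList).1 :: (pvSplitP '/' g.toList).2).length - 1 := by simp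
  rw [hlen]
  have hmap : ∀ k : Nat,
      PySem.Str.join "/" ((((pvSplitP '/' g.toList).1 :: (pvSplitP '/' g.toList).2).map String.ofList).take (k+1))
        = String.ofList (PySem.Chars.join ['/'] (((pvSplitP '/' g.toList).1 :: (pvSplitP '/' g.toList).2).take (k+1))) := by
    intro k
    rw [← List.map_take, pvJoin_map]
  have hrw : (List.range (((pvSplitP '/' g.toList).1 :: (pvSplitP '/' g.toList).2).length - 1)).map
        (fun k => PySem.Str.join "/" ((((pvSplitP '/' g.toList).1 :: (pvSplitP '/' g.toList).2).map String.ofList).take (k+1)))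
      = ((List.range (((pvSplitP '/' g.toList).1 :: (pvSplitP '/' g.toList).2).length - 1)).map
        (fun k => PySem.Chars.join ['/'] (((pvSplitP '/' g.toList).1 :: (pvSplitP '/' g.toList).2).take (k+1)))).map String.ofList := by
    rw [List.map_map]
    exact List.map_congr_left (fun k _ => hmap k)
  rw [hrw, pvFilter_ofList]
  have hGA := pvGA (pvSplitP '/' g.toList).2 (pvSplitP '/' g.toList).1 []
  simp only [List.nil_append] at hGA
  rw [hGA, pvGB]
  rw [List.map_map]
  have hLB := pvLB g.toList [] g (by simp)
  simp only [List.length_nil, Nat.cast_zero] at hLB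
  show List.map (fun l => some (String.ofList l)) (pvBscan [] g.toList) = _
  rw [← hLB]

theorem pvFlat : ∀ (groups : List String),
    ((((groups.filter (fun g => decide (g ≠ ""))).map
          (fun g => (PySem.Chars.splitOn g.toList "/".toList).map String.ofList)).map
        pvGetCombinations).flatten.filter (fun e => decide (e ≠ ""))).map some
      = groups.flatMap (fun g =>
          ((PySem.List.enumerate g.toList 0).filter
              (fun ic => decide (0 < ic.1 ∧ ic.2 = '/'))).map
            (fun ic => some (PySem.Str.slice g none (some ic.1)))) := by
  intro groups
  induction groups with
  | nil => simp
  | cons g gs ih =>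
    by_cases hg : g = ""
    · subst hg
      rw [List.flatMap_cons]
      have h0 : (PySem.List.enumerate ("" : String).toList 0) = [] := rfl
      rw [h0]
      simp only [List.filter_cons, decide_eq_false (show ¬("" : String) ≠ "" by simp),
        Bool.false_eq_true, if_false]
      simpa using ih
    · rw [List.flatMap_cons]
      simp only [List.filter_cons, decide_eq_true (show g ≠ "" from hg), if_true,
        List.map_cons, List.flatten_cons, List.filter_append, List.map_append]
      rw [ih, pvPerGroup g]


-- ===== VERDICT (by name: the statement is the Claim_ definition above) =====
theorem get_all_individual_groups_spec : Claim_equal_get_all_individual_groups := by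
  intro groups _
  unfold Spec_get_all_individual_groups get_all_individual_groups get_all_individual_groups_alt
  have hinner : ∀ (acc : List (Option String)) (g : String),
      (PySem.List.enumerate g.toList 0).foldl (fun acc2 ic =>
          if 0 < ic.1 ∧ ic.2 = '/' then acc2 ++ [some (PySem.Str.slice g none (some ic.1))]
          else acc2) acc
        = acc ++ ((PySem.List.enumerate g.toList 0).filter
              (fun ic => decide (0 < ic.1 ∧ ic.2 = '/'))).map
            (fun ic => some (PySem.Str.slice g none (some ic.1))) := by
    intro acc g
    have hfun : (fun (acc2 : List (Option String)) (ic : Int × Char) =>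
          if 0 < ic.1 ∧ ic.2 = '/' then acc2 ++ [some (PySem.Str.slice g none (some ic.1))]
          else acc2)
        = (fun (acc2 : List (Option String)) (ic : Int × Char) =>
          if (fun ic : Int × Char => decide (0 < ic.1 ∧ ic.2 = '/')) ic = true then
            acc2 ++ [(fun ic : Int × Char => some (PySem.Str.slice g none (some ic.1))) ic]
          else acc2) := by
      funext acc2 ic
      by_cases h : 0 < ic.1 ∧ ic.2 = '/' <;> simp [h]
    rw [hfun, PySem.List.foldl_append_if]
  have houter : groups.foldl (fun acc g =>
        (PySem.List.enumerate g.toList 0).foldl (fun acc2 ic =>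
          if 0 < ic.1 ∧ ic.2 = '/' then acc2 ++ [some (PySem.Str.slice g none (some ic.1))]
          else acc2) acc) (groups.map some)
      = groups.map some ++ groups.flatMap (fun g =>
          ((PySem.List.enumerate g.toList 0).filter
              (fun ic => decide (0 < ic.1 ∧ ic.2 = '/'))).map
            (fun ic => some (PySem.Str.slice g none (some ic.1)))) := by
    rw [show (fun (acc : List (Option String)) (g : String) =>
        (PySem.List.enumerate g.toList 0).foldl (fun acc2 ic =>
          if 0 < ic.1 ∧ ic.2 = '/' then acc2 ++ [some (PySem.Str.slice g none (some ic.1))]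
          else acc2) acc)
      = (fun acc g => acc ++ ((PySem.List.enumerate g.toList 0).filter
              (fun ic => decide (0 < ic.1 ∧ ic.2 = '/'))).map
            (fun ic => some (PySem.Str.slice g none (some ic.1))))
      from funext fun acc => funext fun g => hinner acc g]
    exact PySem.List.foldl_append_eq_flatMap _ _ _
  show PySem.Set.ofList _ = PySem.Set.ofList _
  congr 1
  rw [houter, ← pvFlat groups, List.append_assoc]
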